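-- pv_equiv track=rewrite | github.com/elusojitimileyin/OOP | javascript_task/MinMaxDiffer.py | min_max_differ
-- ===== SOURCE A (Python) =====
-- def min_max_differ(array):
--     min_value = array[0]
--     max_value = array[0]
--
--     for num in range(len(array)):
--         if array[num] < min_value:
--             min_value = array[num]
--     for num in range(len(array)):
--         if array[num] > max_value:
--             max_value = array[num]
--     return [max_value - min_value]
-- ===== SOURCE B (Python) =====
-- def min_max_differ(array):
--     s = sorted(array)
--     return [s[-1] - s[0]]
-- ===== Notes on version B (the rewrite author's own statement) =====
-- stated objective: simpler
-- what changed: Replaces the two separate index-loop min/max scans with a single sort followed by constant-time end indexing (s[-1] - s[0]).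
import Mathlib
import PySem

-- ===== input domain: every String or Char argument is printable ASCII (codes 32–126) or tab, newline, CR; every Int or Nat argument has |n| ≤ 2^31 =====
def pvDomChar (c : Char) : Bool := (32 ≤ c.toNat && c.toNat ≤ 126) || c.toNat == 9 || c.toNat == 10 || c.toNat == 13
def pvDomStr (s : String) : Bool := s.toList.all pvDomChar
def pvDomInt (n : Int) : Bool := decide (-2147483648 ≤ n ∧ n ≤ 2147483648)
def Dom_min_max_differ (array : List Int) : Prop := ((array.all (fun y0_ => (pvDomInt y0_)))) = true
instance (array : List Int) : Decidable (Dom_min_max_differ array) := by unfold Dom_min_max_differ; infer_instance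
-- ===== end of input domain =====

-- B replaces A's two index-loop min/max scans by a single sort with end indexing (simpler decomposition, not faster).

-- ===== PORT A =====
-- array[0] as pyGetD with default 0; the empty list (IndexError in Python) is excluded by Pre_.
def min_max_differ (array : List Int) : List Int :=
  let min0 := PySem.List.pyGetD array 0 0
  let max0 := PySem.List.pyGetD array 0 0
  let min_value := (PySem.List.pyRange 0 (PySem.List.len array) 1).foldl
    (fun mv num => if PySem.List.pyGetD array num 0 < mv then PySem.List.pyGetD array num 0 else mv) min0
  let max_value := (PySem.List.pyRange 0 (PySem.List.len array) 1).foldl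
    (fun mv num => if PySem.List.pyGetD array num 0 > mv then PySem.List.pyGetD array num 0 else mv) max0
  [max_value - min_value]

-- ===== PORT B =====
-- s[-1] / s[0] as pyGetD with default 0; the empty list (IndexError in Python) is excluded by Pre_.
def min_max_differ_alt (array : List Int) : List Int :=
  let s := PySem.List.sorted array (fun x => x) false
  [PySem.List.pyGetD s (-1) 0 - PySem.List.pyGetD s 0 0]

-- ===== PRECONDITION & SPEC =====
-- Pre_ excludes only the empty list, on which Python A raises IndexError (array[0]).
def Pre_min_max_differ (array : List Int) : Prop := array ≠ []
instance (array : List Int) : Decidable (Pre_min_max_differ array) := by unfold Pre_min_max_differ; infer_instance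
def pvWitness_min_max_differ : List Int := [3, -1, 7]

def Spec_min_max_differ (array : List Int) (out : List Int) : Prop := out = min_max_differ_alt array
instance (array : List Int) (out : List Int) : Decidable (Spec_min_max_differ array out) := by unfold Spec_min_max_differ; infer_instance

-- ===== CLAIM (what is proved, stated in full; the proofs are below) =====
def Claim_equal_min_max_differ : Prop := ∀ (array : List Int), Dom_min_max_differ array → Pre_min_max_differ array → Spec_min_max_differ array (min_max_differ array)

-- ===== LEMMAS AND PROOFS =====

-- A's branch bodies are Int min / max.
lemma foldl_if_lt_eq_min (l : List Int) : ∀ a, l.foldl (fun mv x => if x < mv then x else mv) a = l.foldl min a := by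
  induction l with
  | nil => intro a; rfl
  | cons x t ih =>
      intro a
      simp only [List.foldl_cons, ih]
      congr 1
      omega

lemma foldl_if_gt_eq_max (l : List Int) : ∀ a, l.foldl (fun mv x => if x > mv then x else mv) a = l.foldl max a := by
  induction l with
  | nil => intro a; rfl
  | cons x t ih =>
      intro a
      simp only [List.foldl_cons, ih]
      congr 1
      omega

lemma foldl_min_le (l : List Int) : ∀ a, l.foldl min a ≤ a ∧ ∀ y ∈ l, l.foldl min a ≤ y := by
  induction l with
  | nil => intro a; simp
  | cons x t ih =>
      intro a
      obtain ⟨h1, h2⟩ := ih (min a x)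
      refine ⟨le_trans h1 (min_le_left _ _), ?_⟩
      intro y hy
      rcases List.mem_cons.mp hy with rfl | hy
      · exact le_trans h1 (min_le_right _ _)
      · exact h2 y hy

lemma foldl_min_mem (l : List Int) : ∀ a, l.foldl min a = a ∨ l.foldl min a ∈ l := by
  induction l with
  | nil => intro a; simp
  | cons x t ih =>
      intro a
      rcases ih (min a x) with h | h
      · rcases min_choice a x with hm | hm
        · left; rw [List.foldl_cons, hm]; rw [hm] at h; exact h
        · right; rw [List.foldl_cons, hm]; rw [hm] at h; rw [h]; exact List.mem_cons_self
      · right; exact List.mem_cons_of_mem _ h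

lemma foldl_max_ge (l : List Int) : ∀ a, a ≤ l.foldl max a ∧ ∀ y ∈ l, y ≤ l.foldl max a := by
  induction l with
  | nil => intro a; simp
  | cons x t ih =>
      intro a
      obtain ⟨h1, h2⟩ := ih (max a x)
      refine ⟨le_trans (le_max_left _ _) h1, ?_⟩
      intro y hy
      rcases List.mem_cons.mp hy with rfl | hy
      · exact le_trans (le_max_right _ _) h1
      · exact h2 y hy

lemma foldl_max_mem (l : List Int) : ∀ a, l.foldl max a = a ∨ l.foldl max a ∈ l := by
  induction l with
  | nil => intro a; simp
  | cons x t ih =>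
      intro a
      rcases ih (max a x) with h | h
      · rcases max_choice a x with hm | hm
        · left; rw [List.foldl_cons, hm]; rw [hm] at h; exact h
        · right; rw [List.foldl_cons, hm]; rw [hm] at h; rw [h]; exact List.mem_cons_self
      · right; exact List.mem_cons_of_mem _ h

-- the last element of the sorted list dominates every element
lemma sorted_le_getLast (xs : List Int) (hne : PySem.List.sorted xs (fun x => x) false ≠ []) :
    ∀ y ∈ PySem.List.sorted xs (fun x => x) false,
      y ≤ (PySem.List.sorted xs (fun x => x) false).getLast hne := by
  intro y hy
  obtain ⟨p, hp, hpy⟩ := List.mem_iff_getElem.mp hy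
  have hpos : 0 < (PySem.List.sorted xs (fun x => x) false).length :=
    List.length_pos_of_ne_nil hne
  rw [List.getLast_eq_getElem]
  subst hpy
  apply PySem.List.sorted_id_getElem_mono
  all_goals omega

-- ===== VERDICT (by name: the statement is the Claim_ definition above) =====
theorem min_max_differ_spec : Claim_equal_min_max_differ := by
  intro array _ hpre
  unfold Spec_min_max_differ min_max_differ min_max_differ_alt
  obtain ⟨a0, t, rfl⟩ := List.exists_cons_of_ne_nil hpre
  simp only []
  rw [show (PySem.List.pyRange 0 (PySem.List.len (a0 :: t)) 1).foldl
        (fun mv num => if PySem.List.pyGetD (a0 :: t) num 0 < mv then PySem.List.pyGetD (a0 :: t) num 0 else mv)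
        (PySem.List.pyGetD (a0 :: t) 0 0)
      = (a0 :: t).foldl (fun mv v => if v < mv then v else mv) (PySem.List.pyGetD (a0 :: t) 0 0) from
        PySem.List.foldl_pyRange_zero_pyGetD (a0 :: t) 0 (fun mv v => if v < mv then v else mv) (PySem.List.pyGetD (a0 :: t) 0 0),
      show (PySem.List.pyRange 0 (PySem.List.len (a0 :: t)) 1).foldl
        (fun mv num => if PySem.List.pyGetD (a0 :: t) num 0 > mv then PySem.List.pyGetD (a0 :: t) num 0 else mv)
        (PySem.List.pyGetD (a0 :: t) 0 0)
      = (a0 :: t).foldl (fun mv v => if v > mv then v else mv) (PySem.List.pyGetD (a0 :: t) 0 0) from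
        PySem.List.foldl_pyRange_zero_pyGetD (a0 :: t) 0 (fun mv v => if v > mv then v else mv) (PySem.List.pyGetD (a0 :: t) 0 0)]
  rw [foldl_if_lt_eq_min, foldl_if_gt_eq_max, PySem.List.pyGetD_zero_cons]
  have hsne : PySem.List.sorted (a0 :: t) (fun x => x) false ≠ [] := by
    intro hnil
    rw [PySem.List.sorted_eq_nil_iff] at hnil
    cases hnil
  obtain ⟨h, ts, hcons⟩ := List.exists_cons_of_ne_nil hsne
  -- head of the sorted list is the minimum
  have hhle : ∀ y ∈ (a0 :: t), h ≤ y := fun y hy =>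
    PySem.List.key_head_sorted_le (a0 :: t) (fun x => x) hcons y hy
  have hhmem : h ∈ (a0 :: t) := by
    have : h ∈ PySem.List.sorted (a0 :: t) (fun x => x) false := by
      rw [hcons]; exact List.mem_cons_self
    rwa [PySem.List.mem_sorted] at this
  have hmemm : (a0 :: t).foldl min a0 ∈ (a0 :: t) := by
    rcases foldl_min_mem (a0 :: t) a0 with he | he
    · rw [he]; exact List.mem_cons_self
    · exact he
  have hmin : (a0 :: t).foldl min a0 = h := by
    have h1 : (a0 :: t).foldl min a0 ≤ h := (foldl_min_le (a0 :: t) a0).2 h hhmem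
    have h2 : h ≤ (a0 :: t).foldl min a0 := hhle _ hmemm
    omega
  -- last of the sorted list is the maximum
  have hmemM : (a0 :: t).foldl max a0 ∈ (a0 :: t) := by
    rcases foldl_max_mem (a0 :: t) a0 with he | he
    · rw [he]; exact List.mem_cons_self
    · exact he
  have hLmem : (PySem.List.sorted (a0 :: t) (fun x => x) false).getLast hsne ∈ (a0 :: t) := by
    have : (PySem.List.sorted (a0 :: t) (fun x => x) false).getLast hsne
        ∈ PySem.List.sorted (a0 :: t) (fun x => x) false := List.getLast_mem hsne
    rwa [PySem.List.mem_sorted] at this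
  have hMax : (a0 :: t).foldl max a0 = (PySem.List.sorted (a0 :: t) (fun x => x) false).getLast hsne := by
    have h1 : (PySem.List.sorted (a0 :: t) (fun x => x) false).getLast hsne ≤ (a0 :: t).foldl max a0 :=
      (foldl_max_ge (a0 :: t) a0).2 _ hLmem
    have h2 : (a0 :: t).foldl max a0 ≤ (PySem.List.sorted (a0 :: t) (fun x => x) false).getLast hsne := by
      apply sorted_le_getLast (a0 :: t) hsne
      rw [PySem.List.mem_sorted]
      exact hmemM
    omega
  have hH : PySem.List.pyGetD (PySem.List.sorted (a0 :: t) (fun x => x) false) 0 0 = h := by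
    rw [hcons]; exact PySem.List.pyGetD_zero_cons h ts 0
  rw [PySem.List.pyGetD_neg_one _ 0 hsne, hMax, hmin, hH]
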